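-- pv_equiv track=rewrite | github.com/xu1718191411/AT_CODE_BEGINNER_SELECTION | CONTEXT_136/gathering_children.py | calculate
-- ===== SOURCE A (Python) =====
-- def calculate(S):
--     result = []
--
--     rNum = 0
--     lNum = 0
--     for i in range(len(S)):
--         if S[i] == "L":
--             lNum = lNum + 1
--         else:
--             rNum = rNum + 1
--
--         if i > 0:
--             if (S[i] == "R") and (S[i-1] == "L"):
--                 result.append([rNum-1,lNum])
--                 rNum = 1
--                 lNum = 0
--
--         if i == len(S) - 1:
--             result.append([rNum,lNum])
--
--     return result
-- ===== SOURCE B (Python) =====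
-- def calculate(S):
--     # Phase 1: split S into chunks, cutting exactly at each literal "LR" adjacency.
--     chunks = []
--     cur = ""
--     for c in S:
--         if cur.endswith("L") and c == "R":
--             chunks.append(cur)
--             cur = ""
--         cur += c
--     if cur:
--         chunks.append(cur)
--     # Phase 2: count per chunk (any non-'L' char counts as R).
--     return [[len(ch) - ch.count("L"), ch.count("L")] for ch in chunks]
-- ===== Notes on version B (the rewrite author's own statement) =====
-- stated objective: alternative
-- what changed: B replaces A's single incremental counter-resetting pass with two phases: first split S into explicit chunk substrings at each literal 'LR' adjacency, then map a per-chunk counting comprehension over the chunks.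
import Mathlib
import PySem

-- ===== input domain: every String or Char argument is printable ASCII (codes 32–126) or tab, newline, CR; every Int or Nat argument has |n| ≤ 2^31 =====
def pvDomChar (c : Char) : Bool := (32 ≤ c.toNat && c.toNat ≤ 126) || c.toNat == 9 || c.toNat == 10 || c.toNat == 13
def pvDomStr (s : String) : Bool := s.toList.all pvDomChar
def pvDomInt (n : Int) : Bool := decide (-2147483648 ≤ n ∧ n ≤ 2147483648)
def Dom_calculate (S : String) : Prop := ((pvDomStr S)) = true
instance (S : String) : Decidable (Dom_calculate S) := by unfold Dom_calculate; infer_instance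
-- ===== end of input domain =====

-- B splits S into explicit chunks at each 'LR' adjacency, then counts per chunk
-- (alternative decomposition, same O(n) cost; return values proved equal on all of Dom).

-- ===== PORT A =====
-- A's index loop 'for i in range(len(S))' as the obvious structural recursion over the
-- remaining characters, carrying prev = S[i-1] (none ⟺ i == 0) and the same state
-- (rNum, lNum, result); rest' = [] ⟺ i == len(S)-1.
def calcA_loop (prev : Option Char) (rest : List Char) (r l : Int)
    (result : List (List Int)) : List (List Int) :=
  match rest with
  | [] => result
  | c :: rest' =>
    let l1 := if c = 'L' then l + 1 else l
    let r1 := if c = 'L' then r else r + 1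
    let hit : Bool := match prev with
      | some p => c = 'R' && p = 'L'
      | none => false
    let r2 := if hit then 1 else r1
    let l2 := if hit then 0 else l1
    let res2 := if hit then result ++ [[r1 - 1, l1]] else result
    let res3 := if rest' = [] then res2 ++ [[r2, l2]] else res2
    calcA_loop (some c) rest' r2 l2 res3

def calculate (S : String) : List (List Int) :=
  calcA_loop none S.toList 0 0 []

-- ===== PORT B =====
-- cur.endswith('L') on a Python str ⟺ cur.getLast? = some 'L' (false on the empty string)
def calcB_step (st : List (List Char) × List Char) (c : Char) : List (List Char) × List Char :=
  if st.2.getLast? = some 'L' && c = 'R' then (st.1 ++ [st.2], [c]) else (st.1, st.2 ++ [c])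

-- [len(ch) - ch.count('L'), ch.count('L')]
def calcB_count (ch : List Char) : List Int :=
  [(ch.length : Int) - (ch.count 'L' : Int), (ch.count 'L' : Int)]

def calculate_alt (S : String) : List (List Int) :=
  let p := S.toList.foldl calcB_step ([], [])
  let chunks := if p.2 = [] then p.1 else p.1 ++ [p.2]
  chunks.map calcB_count

-- ===== PRECONDITION & SPEC =====
def Spec_calculate (S : String) (out : List (List Int)) : Prop := out = calculate_alt S
instance (S : String) (out : List (List Int)) : Decidable (Spec_calculate S out) := by unfold Spec_calculate; infer_instance

-- ===== CLAIM (what is proved, stated in full; the proofs are below) =====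
def Claim_equal_calculate : Prop := ∀ (S : String), Dom_calculate S → Spec_calculate S (calculate S)

-- ===== LEMMAS AND PROOFS =====

-- invariant: A's loop from state (prev = last cur, r/l = counts of the open chunk cur,
-- result = counted closed chunks) computes B's finalisation of the fold from (chunks, cur).
lemma calc_bridge : ∀ (rest : List Char), rest ≠ [] →
    ∀ (chunks : List (List Char)) (cur : List Char) (p : Char) (r l : Int)
      (acc : List (List Int)),
    cur.getLast? = some p →
    r = (cur.length : Int) - (cur.count 'L' : Int) → l = (cur.count 'L' : Int) →
    acc = chunks.map calcB_count →
    calcA_loop (some p) rest r l acc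
    = List.map calcB_count
        (if (List.foldl calcB_step (chunks, cur) rest).2 = []
         then (List.foldl calcB_step (chunks, cur) rest).1
         else (List.foldl calcB_step (chunks, cur) rest).1
              ++ [(List.foldl calcB_step (chunks, cur) rest).2]) := by
  intro rest
  induction rest with
  | nil => intro h; exact absurd rfl h
  | cons c rest' ih =>
    intro _ chunks cur p r l acc hlast hr hl hacc
    have hcur : cur ≠ [] := by intro h; simp [h] at hlast
    subst hr hl hacc
    by_cases hhit : c = 'R' ∧ p = 'L'
    · -- boundary: close cur, open [c]
      obtain ⟨hc, hp⟩ := hhit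
      subst hc hp
      cases rest' with
      | nil =>
        simp [calcA_loop, calcB_step, hlast, calcB_count]
      | cons d rest'' =>
        rw [calcA_loop, List.foldl_cons]
        simp only [calcB_step, hlast]
        simp only [reduceCtorEq, decide_true, Bool.and_self, if_true, if_false]
        exact ih (by simp) (chunks ++ [cur]) ['R'] 'R' 1 0 _ (by simp)
          (by simp) (by simp) (by simp [calcB_count])
    · -- no boundary: extend cur with c
      have hhitb : (c = 'R' && p = 'L') = false := by
        simp only [Bool.and_eq_false_iff, decide_eq_false_iff_not]
        by_cases h1 : c = 'R'
        · exact Or.inr fun h2 => hhit ⟨h1, h2⟩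
        · exact Or.inl h1
      have hB : (cur.getLast? = some 'L' && c = 'R') = false := by
        simp only [Bool.and_eq_false_iff, decide_eq_false_iff_not, hlast]
        by_cases h2 : c = 'R'
        · exact Or.inl fun h1 => hhit ⟨h2, by injection h1⟩
        · exact Or.inr h2
      cases rest' with
      | nil =>
        by_cases hcL : c = 'L' <;>
          simp [calcA_loop, calcB_step, hB, hhitb, calcB_count, List.count_append, hcL] <;>
          ring_nf
      | cons d rest'' =>
        rw [calcA_loop, List.foldl_cons]
        simp only [calcB_step, hB, Bool.false_eq_true, if_false, hhitb, reduceCtorEq]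
        refine ih (by simp) chunks (cur ++ [c]) c _ _ _ (by simp) ?_ ?_ rfl
        · by_cases hcL : c = 'L' <;> simp [List.count_append, hcL] <;> ring
        · by_cases hcL : c = 'L' <;> simp [List.count_append, hcL]

theorem calculate_spec : Claim_equal_calculate := by
  unfold Claim_equal_calculate Spec_calculate
  intro S _
  unfold calculate calculate_alt
  cases hS : S.toList with
  | nil => simp [calcA_loop]
  | cons c rest =>
    cases rest with
    | nil =>
      by_cases hcL : c = 'L' <;>
        simp [calcA_loop, calcB_step, calcB_count, hcL]
    | cons d rest' =>
      rw [calcA_loop, List.foldl_cons]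
      simp only [calcB_step, List.getLast?_nil, reduceCtorEq, decide_false,
        Bool.false_and, Bool.false_eq_true, if_false, List.nil_append]
      refine calc_bridge (d :: rest') (by simp) [] [c] c _ _ _ (by simp) ?_ ?_ (by simp)
      · by_cases hcL : c = 'L' <;> simp [hcL]
      · by_cases hcL : c = 'L' <;> simp [hcL]
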